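-- pv_equiv track=rewrite | github.com/dsamue/Tillampad-datalogi | Lab5/Backup/äldre.1/hashfil.py | hashfunktion
-- ===== SOURCE A (Python) =====
-- def hashfunktion(namn):
--     index=0
--     faktor=1
--     for bokstav in namn:
--         nummer=ord(bokstav)
--         x=faktor*nummer
--         index+=x
--         faktor*=100
--     return index
-- ===== SOURCE B (Python) =====
-- def hashfunktion(namn):
--     n = len(namn)
--     if n == 0:
--         return 0
--     if n == 1:
--         return ord(namn)
--     mid = n // 2
--     return hashfunktion(namn[:mid]) + 100 ** mid * hashfunktion(namn[mid:])
-- ===== Notes on version B (the rewrite author's own statement) =====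
-- stated objective: faster
-- what changed: Replaces the forward loop with two accumulators (index, faktor) by divide and conquer: hash the two halves recursively and combine as left + 100**mid * right, which lets Python's subquadratic big-int multiplication do the heavy lifting on long strings.
import Mathlib
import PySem

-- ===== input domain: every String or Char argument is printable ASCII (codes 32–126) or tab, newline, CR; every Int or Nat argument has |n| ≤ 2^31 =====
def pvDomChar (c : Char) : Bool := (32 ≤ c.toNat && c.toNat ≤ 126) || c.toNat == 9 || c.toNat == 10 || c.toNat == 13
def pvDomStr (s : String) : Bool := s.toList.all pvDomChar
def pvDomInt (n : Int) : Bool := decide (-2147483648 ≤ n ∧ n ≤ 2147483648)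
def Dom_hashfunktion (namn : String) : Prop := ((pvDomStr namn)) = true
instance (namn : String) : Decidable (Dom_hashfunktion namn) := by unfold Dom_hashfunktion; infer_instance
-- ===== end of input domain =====

-- ===== PORT A =====
-- Port of A: forward fold carrying (index, faktor), faktor multiplied by 100 each step.
def hashfunktion (namn : String) : Int :=
  (namn.toList.foldl
    (fun (s : Int × Int) (bokstav : Char) =>
      (s.1 + s.2 * (bokstav.toNat : Int), s.2 * 100))
    (0, 1)).1

-- ===== PORT B =====
-- B: divide and conquer — hash of the first half plus 100^mid times the hash of the
-- second half; recursion on halves instead of a loop with accumulators.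
def hashDC (l : List Char) : Int :=
  match l with
  | [] => 0
  | [c] => (c.toNat : Int)
  | c1 :: c2 :: rest =>
    let mid := (c1 :: c2 :: rest).length / 2
    hashDC ((c1 :: c2 :: rest).take mid) + 100 ^ mid * hashDC ((c1 :: c2 :: rest).drop mid)
termination_by l.length
decreasing_by
  · simp; omega
  · simp; omega

def hashfunktion_alt (namn : String) : Int := hashDC namn.toList

-- ===== PRECONDITION & SPEC =====
def Spec_hashfunktion (namn : String) (out : Int) : Prop := out = hashfunktion_alt namn
instance (namn : String) (out : Int) : Decidable (Spec_hashfunktion namn out) := by unfold Spec_hashfunktion; infer_instance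

-- ===== CLAIM =====
def Claim_equal_hashfunktion : Prop := ∀ (namn : String), Dom_hashfunktion namn → Spec_hashfunktion namn (hashfunktion namn)

-- ===== LEMMAS AND PROOFS =====
-- Proof-side Horner form both sides are reduced to.
def pvHorner : List Char → Int
  | [] => 0
  | c :: t => (c.toNat : Int) + 100 * pvHorner t

-- A's fold from any state (i, f) equals i + f * pvHorner of the remaining list.
theorem foldA_eq (l : List Char) : ∀ (i f : Int),
    (l.foldl (fun (s : Int × Int) (c : Char) =>
      (s.1 + s.2 * (c.toNat : Int), s.2 * 100)) (i, f)).1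
      = i + f * pvHorner l := by
  induction l with
  | nil => intro i f; simp [pvHorner]
  | cons c t ih => intro i f; simp [List.foldl, pvHorner, ih]; ring

-- Horner form of a concatenation: the tail is weighted by 100^(length of the head).
theorem pvHorner_append (a b : List Char) :
    pvHorner (a ++ b) = pvHorner a + 100 ^ a.length * pvHorner b := by
  induction a with
  | nil => simp [pvHorner]
  | cons c t ih => simp [pvHorner, ih, pow_succ]; ring

-- B's divide-and-conquer equals the Horner form.
theorem hashDC_eq (l : List Char) : hashDC l = pvHorner l := by
  fun_induction hashDC l with
  | case1 => simp [pvHorner]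
  | case2 c => simp [pvHorner]
  | case3 c1 c2 rest mid ih1 ih2 =>
    set l := c1 :: c2 :: rest with hl
    have h : pvHorner l = pvHorner (l.take mid ++ l.drop mid) := by
      rw [List.take_append_drop]
    rw [h, pvHorner_append, ih1, ih2, List.length_take]
    have hm : min mid l.length = mid := by
      have := Nat.div_le_self l.length 2
      simp only [hl] at *
      omega
    rw [hm]

-- ===== VERDICT =====
theorem hashfunktion_spec : Claim_equal_hashfunktion := by
  intro namn _
  unfold Spec_hashfunktion hashfunktion hashfunktion_alt
  rw [foldA_eq, hashDC_eq]
  simp
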